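-- pv_equiv track=rewrite | github.com/sahba-t/Locality_sensitive_Hashing | localHash.py | tuple_to_idx
-- ===== SOURCE A (Python) =====
-- def tuple_to_idx(v):
--     result = 0
--     mask = 1
--     for x in v:
--         # if the element is +, we translate that as 1. otherwise 0 this way we map
--         # from k elements in the vector to a 2^k number
--         if x > 0:
--             result |= mask
--         mask <<= 1
--     return result
-- ===== SOURCE B (Python) =====
-- def tuple_to_idx(v):
--     # Horner evaluation back-to-front: the last element is the most significant
--     # bit, so folding from the right with result = 2*result + bit gives the
--     # little-endian value without any mask or bitwise operation.
--     result = 0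
--     for x in reversed(v):
--         result = 2 * result + (1 if x > 0 else 0)
--     return result
-- ===== Notes on version B (the rewrite author's own statement) =====
-- stated objective: alternative
-- what changed: Replaces the forward loop with a running power-of-two mask and bitwise OR/shift by a back-to-front Horner loop (result = 2*result + bit over reversed(v)) with a single arithmetic accumulator and no bitwise operations.
import Mathlib
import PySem

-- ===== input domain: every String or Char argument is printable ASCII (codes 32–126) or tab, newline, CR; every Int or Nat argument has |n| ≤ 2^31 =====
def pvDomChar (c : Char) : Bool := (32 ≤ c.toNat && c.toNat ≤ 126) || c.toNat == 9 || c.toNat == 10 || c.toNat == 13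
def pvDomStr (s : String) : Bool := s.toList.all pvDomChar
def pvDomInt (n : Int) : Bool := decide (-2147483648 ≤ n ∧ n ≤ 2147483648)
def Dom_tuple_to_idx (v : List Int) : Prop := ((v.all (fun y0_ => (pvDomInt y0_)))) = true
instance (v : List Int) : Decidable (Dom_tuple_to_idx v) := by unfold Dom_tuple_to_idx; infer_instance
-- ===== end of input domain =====

-- B replaces A's forward loop with a running mask and bitwise OR/shift by a
-- back-to-front Horner loop (result = 2*result + bit over reversed(v)); same cost (alternative).

-- ===== PORT A =====
-- A: result/mask state, forward loop, result |= mask on positive, mask <<= 1.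
def tuple_to_idx (v : List Int) : Int :=
  (v.foldl (fun (st : Int × Int) x =>
      ((if x > 0 then PySem.Int.bor st.1 st.2 else st.1), st.2 <<< (1 : Nat)))
    (0, 1)).1

-- ===== PORT B =====
-- B: Horner loop over reversed(v), result = 2*result + (1 if x > 0 else 0).
def tuple_to_idx_alt (v : List Int) : Int :=
  v.reverse.foldl (fun (result : Int) x => 2 * result + (if x > 0 then 1 else 0)) 0

-- ===== PRECONDITION & SPEC =====
def Spec_tuple_to_idx (v : List Int) (out : Int) : Prop := out = tuple_to_idx_alt v
instance (v : List Int) (out : Int) : Decidable (Spec_tuple_to_idx v out) := by unfold Spec_tuple_to_idx; infer_instance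

-- ===== CLAIM (what is proved, stated in full; the proofs are below) =====
def Claim_equal_tuple_to_idx : Prop := ∀ (v : List Int), Dom_tuple_to_idx v → Spec_tuple_to_idx v (tuple_to_idx v)

-- ===== LEMMAS AND PROOFS =====

-- the little-endian 0/1 value of the sign vector, over Nat
def pvNatVal (v : List Int) : Nat :=
  v.foldr (fun x a => 2 * a + (if x > 0 then 1 else 0)) 0

theorem pvLorTwoPow (r k : Nat) (h : r < 2 ^ k) : r ||| 2 ^ k = r + 2 ^ k := by
  apply Nat.eq_of_testBit_eq; intro i
  rw [Nat.testBit_lor, Nat.add_comm r]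
  rcases lt_trichotomy i k with hi | rfl | hi
  · rw [Nat.testBit_two_pow_add_gt hi, Nat.testBit_two_pow_of_ne (by omega)]; simp
  · rw [Nat.testBit_two_pow_add_eq, Nat.testBit_lt_two_pow h, Nat.testBit_two_pow_self]; simp
  · have h2 : 2 ^ k + r < 2 ^ i := lt_of_lt_of_le (by omega) (Nat.pow_le_pow_right (by norm_num) hi)
    rw [Nat.testBit_lt_two_pow h2, Nat.testBit_lt_two_pow (show r < 2 ^ i by omega),
        Nat.testBit_two_pow_of_ne (by omega)]
    simp

theorem pvShiftPow (k : Nat) : ((2 ^ k : Nat) : Int) <<< (1 : Nat) = ((2 ^ (k + 1) : Nat) : Int) := by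
  simp [Int.shiftLeft_eq]; ring

theorem pvLoopA_inv (v : List Int) (k r : Nat) (hr : r < 2 ^ k) :
    (v.foldl (fun (st : Int × Int) x =>
        ((if x > 0 then PySem.Int.bor st.1 st.2 else st.1), st.2 <<< (1 : Nat)))
      (((r : Nat) : Int), ((2 ^ k : Nat) : Int))).1
    = ((r + 2 ^ k * pvNatVal v : Nat) : Int) := by
  induction v generalizing k r with
  | nil => simp [pvNatVal]
  | cons x v ih =>
    simp only [List.foldl_cons, pvShiftPow]
    by_cases hx : x > 0
    · rw [if_pos hx, PySem.Int.bor_natCast, pvLorTwoPow r k hr,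
        ih (k + 1) (r + 2 ^ k) (by omega)]
      congr 1
      show r + 2 ^ k + 2 ^ (k + 1) * pvNatVal v
         = r + 2 ^ k * pvNatVal (x :: v)
      simp only [pvNatVal, List.foldr_cons, if_pos hx]
      ring
    · rw [if_neg hx, ih (k + 1) r (by calc r < 2 ^ k := hr
        _ ≤ 2 ^ (k + 1) := Nat.pow_le_pow_right (by norm_num) (by omega))]
      congr 1
      show r + 2 ^ (k + 1) * pvNatVal v = r + 2 ^ k * pvNatVal (x :: v)
      simp only [pvNatVal, List.foldr_cons, if_neg hx]
      ring

theorem pvAltVal (v : List Int) : tuple_to_idx_alt v = ((pvNatVal v : Nat) : Int) := by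
  unfold tuple_to_idx_alt
  rw [List.foldl_reverse]
  induction v with
  | nil => simp [pvNatVal]
  | cons x v ih =>
    simp only [pvNatVal, List.foldr_cons] at *
    rw [ih]
    by_cases hx : x > 0 <;> simp [hx]

-- ===== VERDICT (by name: the statement is the Claim_ definition above) =====
theorem tuple_to_idx_spec : Claim_equal_tuple_to_idx := by
  intro v _
  unfold Spec_tuple_to_idx tuple_to_idx
  have h := pvLoopA_inv v 0 0 (by norm_num)
  simp only [pow_zero, Nat.cast_zero, Nat.cast_one] at h
  rw [h, pvAltVal]
  simp
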